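-- pv_equiv track=rewrite | github.com/shmulisarmy/fuzzt-seatcher | fuzzySearcher.py | lessFuzzyFilter
-- ===== SOURCE A (Python) =====
-- from collections import defaultdict, Counter
-- from typing import List, Dict, Iterable
--
-- def lessFuzzyFilter(candidates: Iterable[str], searchLetters: str, tolerance: int) -> List[str]:
--     """
--     External Doc
--     ------------
--     Filters candidates allowing some tolerance for letter mismatches.
--
--     Parameters:
--     -----------
--     candidates: Iterable[str]
--         The list of candidate words.
--     searchLetters: str
--         The sequence of letters to match.
--     tolerance: int
--         Number of allowed mismatches.
--
--     Returns:
--     --------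
--     List[str]
--         Words that match with a tolerance for mismatches.
--
--     When to use:
--     ------------
--     Use when some deviations in letter order or positioning are acceptable.
--     """
--
--     """
--     Internal Doc
--     ------------
--     Iterates over the candidates and checks for matches with the search letters while tracking mismatches.
--     If mismatches exceed the tolerance, the word is skipped. Otherwise, words with the smallest mismatch are returned.
--     """
--     passingCandidates: Dict[int, List[str]] = defaultdict(list)
--     for candidate in candidates:
--         distanceWithNoMatch: int = 0
--         uptoInSearchLetters = 0
--         greatestDistanceWithNoMatch = 0
--         for letter in candidate:
--             if letter == searchLetters[uptoInSearchLetters]: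
--                 distanceWithNoMatch = 0
--                 uptoInSearchLetters += 1
--                 if uptoInSearchLetters == len(searchLetters):
--                     passingCandidates[greatestDistanceWithNoMatch].append(candidate)
--                     break
--             else:
--                 distanceWithNoMatch += 1
--                 greatestDistanceWithNoMatch = max(greatestDistanceWithNoMatch, distanceWithNoMatch)
--                 if distanceWithNoMatch > tolerance:
--                     break
--
--     results = []
--     for key in sorted(passingCandidates.keys()):
--         results.extend(passingCandidates[key])
--     return results
-- ===== SOURCE B (Python) =====
-- def _greatestGap(word, pattern, tolerance):
--     """Greedily match pattern as a subsequence of word, jumping to each next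
--     occurrence with str.find; return the largest mismatch gap, or None.
--     A negative tolerance allows no mismatches at all."""
--     limit = max(tolerance, 0)
--     rest = word
--     worst = 0
--     for p in pattern:
--         j = rest.find(p)
--         if j < 0 or j > limit:
--             return None
--         if j > worst:
--             worst = j
--         rest = rest[j + 1:]
--     return worst
--
--
-- def lessFuzzyFilter(candidates, searchLetters, tolerance):
--     matched = []
--     for candidate in candidates:
--         gap = _greatestGap(candidate, searchLetters, tolerance)
--         if gap is not None:
--             matched.append((gap, candidate))
--     return [word for _, word in sorted(matched, key=lambda pair: pair[0])]
-- ===== Notes on version B (the rewrite author's own statement) =====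
-- stated objective: alternative
-- what changed: Per candidate the char-by-char mismatch-counter scan is replaced by jumping with str.find to each next pattern letter and measuring the gap, and the gap-keyed defaultdict buckets flattened in sorted-key order are replaced by a flat (gap, word) list finished with one stable sort on the gap.
-- outside the precondition, e.g. on lessFuzzyFilter([''], '', 0): A returns [], B returns ['']
-- crash fix: When searchLetters is empty and some candidate is non-empty, A raises IndexError on searchLetters[0]; B treats the empty pattern as trivially matched with gap 0 and returns all candidates in order. — e.g. on lessFuzzyFilter(["ab"], "", 0): A raises IndexError, B returns ["ab"]
import Mathlib
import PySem

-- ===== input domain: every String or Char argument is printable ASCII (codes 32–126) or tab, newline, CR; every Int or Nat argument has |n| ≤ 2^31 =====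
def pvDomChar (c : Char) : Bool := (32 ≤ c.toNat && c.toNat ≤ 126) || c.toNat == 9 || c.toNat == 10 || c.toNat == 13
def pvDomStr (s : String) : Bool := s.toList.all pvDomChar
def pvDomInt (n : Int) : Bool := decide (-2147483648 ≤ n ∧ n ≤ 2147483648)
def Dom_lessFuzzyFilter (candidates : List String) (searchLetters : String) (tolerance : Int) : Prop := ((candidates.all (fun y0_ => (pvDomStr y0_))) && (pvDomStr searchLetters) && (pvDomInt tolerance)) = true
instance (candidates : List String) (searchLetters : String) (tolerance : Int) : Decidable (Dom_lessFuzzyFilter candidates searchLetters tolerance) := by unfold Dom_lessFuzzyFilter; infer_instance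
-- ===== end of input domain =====

-- B replaces the char-by-char mismatch counter by find-and-jump greedy matching and the
-- gap-keyed buckets by one stable sort of flat (gap, word) pairs; same cost, different structure.

-- ===== PORT A =====
-- A's inner `for letter in candidate` loop: state (distanceWithNoMatch, greatestDistanceWithNoMatch,
-- uptoInSearchLetters); returns `some greatestDistanceWithNoMatch` exactly when the Python appends
-- the candidate (then breaks), `none` when the loop breaks on tolerance, ends, or hits the
-- IndexError of searchLetters[upto] (empty searchLetters; outside Pre_).
def lfInner (sl : List Char) (tol : Int) : List Char → Int → Int → Nat → Option Int
  | [], _dist, _greatest, _upto => none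
  | letter :: rest, dist, greatest, upto =>
    match PySem.List.pyGet? sl (upto : Int) with
    | none => none
    | some p =>
      if letter = p then
        if upto + 1 = sl.length then some greatest
        else lfInner sl tol rest 0 greatest (upto + 1)
      else
        let dist' := dist + 1
        let greatest' := max greatest dist'
        if dist' > tol then none else lfInner sl tol rest dist' greatest' upto

def lessFuzzyFilter (candidates : List String) (searchLetters : String) (tolerance : Int) : List String :=
  let passingCandidates : PySem.Dict Int (List String) :=
    candidates.foldl (fun d candidate =>
      match lfInner searchLetters.toList tolerance candidate.toList 0 0 0 with
      | some g => d.modify g [] (fun l => l ++ [candidate])   -- passingCandidates[g].append(candidate)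
      | none => d) PySem.Dict.empty
  (PySem.List.sorted passingCandidates.keys (fun k => k) false).foldl
    (fun results k => results ++ passingCandidates.getD k []) []

-- ===== PORT B =====
-- B's _greatestGap: walk the pattern, `j = rest.find(p)`, fail on j < 0 or j > limit,
-- else record the gap and continue on rest[j+1:].
def bGapLoop (limit : Int) : List Char → List Char → Int → Option Int
  | [], _rest, worst => some worst
  | p :: ps, rest, worst =>
    let j := PySem.Chars.find rest [p]
    if j < 0 ∨ j > limit then none
    else bGapLoop limit ps (PySem.List.slice rest (some (j + 1))) (if j > worst then j else worst)

def bGreatestGap (word : List Char) (pattern : List Char) (tolerance : Int) : Option Int :=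
  bGapLoop (max tolerance 0) pattern word 0

def lessFuzzyFilter_alt (candidates : List String) (searchLetters : String) (tolerance : Int) : List String :=
  let matched : List (Int × String) :=
    candidates.foldl (fun acc candidate =>
      match bGreatestGap candidate.toList searchLetters.toList tolerance with
      | some gap => acc ++ [(gap, candidate)]
      | none => acc) []
  (PySem.List.sorted matched (fun pair => pair.1) false).map (fun pair => pair.2)

-- ===== PRECONDITION & SPEC =====
-- Pre_ excludes empty searchLetters: there A raises IndexError on searchLetters[0] as soon as a
-- non-empty candidate is scanned, and on the remaining corner (only empty candidates) A's [] versus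
-- B's trivial-match behaviour is an accident of the raw indexing, so the whole corner is excluded.
def Pre_lessFuzzyFilter (candidates : List String) (searchLetters : String) (tolerance : Int) : Prop :=
  searchLetters ≠ ""
instance (candidates : List String) (searchLetters : String) (tolerance : Int) : Decidable (Pre_lessFuzzyFilter candidates searchLetters tolerance) := by unfold Pre_lessFuzzyFilter; infer_instance

def pvWitness_lessFuzzyFilter : List String × String × Int := (["abc", "xbc", "b"], "bc", 1)

-- A raises IndexError (searchLetters[0] on an empty searchLetters) whenever some candidate is
-- non-empty; B treats the empty pattern as trivially matched with gap 0 and returns all candidates in order.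
def Raises_lessFuzzyFilter (candidates : List String) (searchLetters : String) (tolerance : Int) : Prop :=
  searchLetters = "" ∧ ¬ (∀ c ∈ candidates, c = "")
instance (candidates : List String) (searchLetters : String) (tolerance : Int) : Decidable (Raises_lessFuzzyFilter candidates searchLetters tolerance) := by unfold Raises_lessFuzzyFilter; infer_instance
def pvRaiseWitness_lessFuzzyFilter : List String × String × Int := (["ab"], "", 0)
def pvRaiseWitnessOut_lessFuzzyFilter : List String := ["ab"]

def Spec_lessFuzzyFilter (candidates : List String) (searchLetters : String) (tolerance : Int) (out : List String) : Prop := out = lessFuzzyFilter_alt candidates searchLetters tolerance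
instance (candidates : List String) (searchLetters : String) (tolerance : Int) (out : List String) : Decidable (Spec_lessFuzzyFilter candidates searchLetters tolerance out) := by unfold Spec_lessFuzzyFilter; infer_instance

-- ===== CLAIM (what is proved, stated in full; the proofs are below) =====
def Claim_equal_lessFuzzyFilter : Prop := ∀ (candidates : List String) (searchLetters : String) (tolerance : Int), Dom_lessFuzzyFilter candidates searchLetters tolerance → Pre_lessFuzzyFilter candidates searchLetters tolerance → Spec_lessFuzzyFilter candidates searchLetters tolerance (lessFuzzyFilter candidates searchLetters tolerance)
def Claim_raises_lessFuzzyFilter : Prop := (∀ (candidates : List String) (searchLetters : String) (tolerance : Int), Dom_lessFuzzyFilter candidates searchLetters tolerance → Raises_lessFuzzyFilter candidates searchLetters tolerance → ¬ Pre_lessFuzzyFilter candidates searchLetters tolerance) ∧ (Dom_lessFuzzyFilter (pvRaiseWitness_lessFuzzyFilter.1) (pvRaiseWitness_lessFuzzyFilter.2.1) (pvRaiseWitness_lessFuzzyFilter.2.2) ∧ Raises_lessFuzzyFilter (pvRaiseWitness_lessFuzzyFilter.1) (pvRaiseWitness_lessFuzzyFilter.2.1) (pvRaiseWitness_lessFuzzyFilter.2.2)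 ∧ lessFuzzyFilter_alt (pvRaiseWitness_lessFuzzyFilter.1) (pvRaiseWitness_lessFuzzyFilter.2.1) (pvRaiseWitness_lessFuzzyFilter.2.2) = pvRaiseWitnessOut_lessFuzzyFilter)

-- ===== LEMMAS AND PROOFS =====

theorem find_go_singleton (p : Char) : ∀ (s : List Char) (k : Nat),
    PySem.Chars.find.go [p] s k =
      match s.findIdx? (fun c => p == c) with
      | some i => ((k + i : Nat) : Int)
      | none => -1 := by
  intro s
  induction s with
  | nil => intro k; simp [PySem.Chars.find.go]
  | cons h t ih =>
    intro k
    rw [PySem.Chars.find.go]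
    by_cases hp : p = h
    · simp [hp, List.findIdx?_cons, List.isPrefixOf]
    · have hb : (p == h) = false := by simp [hp]
      simp only [List.isPrefixOf, hb, Bool.false_and, List.findIdx?_cons, ih (k+1)]
      cases hfi : List.findIdx? (fun c => p == c) t with
      | none => simp
      | some i => simp; ring

theorem find_singleton (s : List Char) (p : Char) :
    PySem.Chars.find s [p] =
      match s.findIdx? (fun c => p == c) with
      | some i => (i : Int)
      | none => -1 := by
  rw [PySem.Chars.find, find_go_singleton]
  cases List.findIdx? (fun c => p == c) s <;> simp

theorem insertBy_append_left {α : Type} (before : α → α → Bool) (x : α) :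
    ∀ (A B : List α), (∀ a ∈ A, before x a = false) →
      PySem.List.insertBy before x (A ++ B) = A ++ PySem.List.insertBy before x B := by
  intro A
  induction A with
  | nil => simp
  | cons a A ih =>
    intro B h
    have ha : before x a = false := h a (by simp)
    simp only [List.cons_append, PySem.List.insertBy, ha]
    rw [ih B (fun a ha' => h a (by simp [ha']))]
    simp

theorem sorted_append_singleton {α κ : Type} [LinearOrder κ] (xs : List α) (y : α) (key : α → κ) :
    PySem.List.sorted (xs ++ [y]) key false =
      PySem.List.insertBy (fun a b => decide (key a < key b)) y (PySem.List.sorted xs key false) := by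
  rw [PySem.List.sorted_eq_foldl_insertBy, PySem.List.sorted_eq_foldl_insertBy, List.foldl_append]
  simp

theorem sorted_min_split (g : Int) :
    ∀ (xs : List (Int × String)), (∀ pr ∈ xs, g ≤ pr.1) →
      PySem.List.sorted xs (fun pr => pr.1) false =
        xs.filter (fun pr => pr.1 == g) ++
          PySem.List.sorted (xs.filter (fun pr => !(pr.1 == g))) (fun pr => pr.1) false := by
  intro xs
  induction xs using List.reverseRecOn with
  | nil => simp
  | append_singleton xs y ih =>
    intro h
    have hxs : ∀ pr ∈ xs, g ≤ pr.1 := fun pr hpr => h pr (by simp [hpr])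
    have hy : g ≤ y.1 := h y (by simp)
    rw [sorted_append_singleton, ih hxs]
    by_cases hyg : y.1 = g
    · have hf1 : (xs ++ [y]).filter (fun pr => pr.1 == g) = xs.filter (fun pr => pr.1 == g) ++ [y] := by
        simp [List.filter_append, hyg]
      have hf2 : (xs ++ [y]).filter (fun pr => !(pr.1 == g)) = xs.filter (fun pr => !(pr.1 == g)) := by
        simp [List.filter_append, hyg]
      rw [hf1, hf2]
      rw [insertBy_append_left _ _ _ _ (by
        intro a ha
        have : a.1 = g := by simpa using (List.of_mem_filter ha)
        simp [hyg, this])]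
      cases hS : PySem.List.sorted (xs.filter (fun pr => !(pr.1 == g))) (fun pr => pr.1) false with
      | nil => simp [PySem.List.insertBy]
      | cons s S' =>
        have hs : s ∈ xs.filter (fun pr => !(pr.1 == g)) := by
          rw [← PySem.List.mem_sorted (key := fun pr : Int × String => pr.1) (rev := false), hS]; simp
        have hsg : ¬ (s.1 = g) := by simpa using (List.of_mem_filter hs)
        have hsx : g ≤ s.1 := hxs s (List.mem_of_mem_filter hs)
        have : (decide (y.1 < s.1)) = true := by simp [hyg]; omega
        simp [PySem.List.insertBy, this]
    · have hf1 : (xs ++ [y]).filter (fun pr => pr.1 == g) = xs.filter (fun pr => pr.1 == g) := by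
        simp [List.filter_append, hyg]
      have hf2 : (xs ++ [y]).filter (fun pr => !(pr.1 == g)) = xs.filter (fun pr => !(pr.1 == g)) ++ [y] := by
        simp [List.filter_append, hyg]
      rw [hf1, hf2, sorted_append_singleton]
      rw [insertBy_append_left _ _ _ _ (by
        intro a ha
        have : a.1 = g := by simpa using (List.of_mem_filter ha)
        have : ¬ (y.1 < a.1) := by omega
        simp [this])]

theorem bucket_concat :
    ∀ (K : List Int), K.Pairwise (· < ·) →
      ∀ (xs : List (Int × String)), (∀ pr ∈ xs, pr.1 ∈ K) →
        PySem.List.sorted xs (fun pr => pr.1) false =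
          K.flatMap (fun g => xs.filter (fun pr => pr.1 == g)) := by
  intro K
  induction K with
  | nil =>
    intro _ xs hmem
    have : xs = [] := by
      cases xs with
      | nil => rfl
      | cons a l => exact absurd (hmem a (by simp)) (by simp)
    simp [this]
    rfl
  | cons gk K' ih =>
    intro hpw xs hmem
    have hlt : ∀ k ∈ K', gk < k := (List.pairwise_cons.mp hpw).1
    have hpw' : K'.Pairwise (· < ·) := (List.pairwise_cons.mp hpw).2
    have hmin : ∀ pr ∈ xs, gk ≤ pr.1 := by
      intro pr hpr
      rcases List.mem_cons.mp (hmem pr hpr) with h | h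
      · omega
      · exact le_of_lt (hlt _ h)
    rw [sorted_min_split gk xs hmin]
    rw [ih hpw' (xs.filter (fun pr => !(pr.1 == gk))) (by
      intro pr hpr
      have h1 : ¬ (pr.1 = gk) := by simpa using List.of_mem_filter hpr
      rcases List.mem_cons.mp (hmem pr (List.mem_of_mem_filter hpr)) with h | h
      · exact absurd h h1
      · exact h)]
    rw [List.flatMap_cons]
    congr 1
    refine List.flatMap_congr (fun g' hg' => ?_)
    rw [List.filter_filter]
    refine List.filter_congr (fun pr _ => ?_)
    by_cases hp : pr.1 = g'
    · have hne : ¬ (g' = gk) := by have := hlt g' hg'; omega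
      simp [hp, hne]
    · simp [hp]

theorem bGapLoop_cons (limit : Int) (p : Char) (ps rest : List Char) (worst : Int) :
    bGapLoop limit (p :: ps) rest worst =
      (match rest.findIdx? (fun c => p == c) with
       | none => none
       | some j => if (j : Int) > limit then none
          else bGapLoop limit ps (rest.drop (j+1)) (if (j : Int) > worst then (j : Int) else worst)) := by
  rw [bGapLoop, find_singleton]
  cases hfi : rest.findIdx? (fun c => p == c) with
  | none => simp
  | some j =>
    have hj0 : ¬ ((j : Int) < 0) := by omega
    have hsl : PySem.List.slice rest (some ((j:Int) + 1)) = rest.drop (j+1) := by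
      rw [PySem.List.slice_from rest (by omega)]
      have ht : ((j:Int)+1).toNat = j + 1 := by omega
      rw [ht]
    by_cases hjl : (j : Int) > limit
    · simp [hjl, hj0]
    · simp [hjl, hj0, hsl]

theorem inner_eq (sl : List Char) (tol : Int) :
    ∀ (w : List Char) (upto : Nat), upto < sl.length → ∀ (dist greatest : Int),
      0 ≤ dist → dist ≤ max tol 0 → 0 ≤ greatest → dist ≤ greatest →
      lfInner sl tol w dist greatest upto =
        (match w.findIdx? (fun c => sl[upto]! == c) with
         | none => none
         | some j => if ((dist + j : Int) > max tol 0) then none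
             else bGapLoop (max tol 0) (sl.drop (upto+1)) (w.drop (j+1)) (max greatest (dist + j))) := by
  intro w
  induction w with
  | nil => intro upto h dist greatest h0 h1 h2 h3; simp [lfInner]
  | cons c w ih =>
    intro upto h dist greatest h0 h1 h2 h3
    have hget : PySem.List.pyGet? sl (upto : Int) = some sl[upto] := by
      rw [PySem.List.pyGet?_natCast]
      exact List.getElem?_eq_getElem h
    have hbang : sl[upto]! = sl[upto] := getElem!_pos sl upto h
    rw [lfInner, hget]
    by_cases hc : c = sl[upto]
    · have hfi0 : List.findIdx? (fun c' => sl[upto]! == c') (c :: w) = some 0 := by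
        simp [List.findIdx?_cons, hbang, hc]
      simp only [hfi0, if_pos hc]
      have hnd : ¬ ((dist + ((0:Nat) : Int)) > max tol 0) := by push_cast; omega
      have hmg : max greatest (dist + ((0:Nat) : Int)) = greatest := by push_cast; omega
      rw [if_neg hnd, hmg]
      by_cases hend : upto + 1 = sl.length
      · rw [if_pos hend, hend, List.drop_length]
        rfl
      · have hlt : upto + 1 < sl.length := by omega
        rw [if_neg hend, ih (upto+1) hlt 0 greatest le_rfl (by omega) h2 h2]
        rw [List.drop_eq_getElem_cons hlt, bGapLoop_cons]
        have hbang' : ∀ c', (sl[upto+1]! == c') = (sl[upto+1] == c') := by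
          intro c'; rw [getElem!_pos sl (upto+1) hlt]
        simp only [hbang', List.drop_succ_cons, List.drop_zero]
        cases hfi : List.findIdx? (fun c' => sl[upto+1] == c') w with
        | none => rfl
        | some j =>
          have hmx : (if (j:Int) > greatest then (j:Int) else greatest) = max greatest ((0:Int) + (j:Int)) := by
            rw [max_def]; split_ifs <;> omega
          simp only [zero_add, hmx]
    · have hfiS : List.findIdx? (fun c' => sl[upto]! == c') (c :: w) =
          Option.map (fun i => i + 1) (List.findIdx? (fun c' => sl[upto]! == c') w) := by
        have hb : (sl[upto]! == c) = false := by
          rw [hbang]; exact beq_false_of_ne (fun hh => hc hh.symm)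
        simp only [List.findIdx?_cons, hb, Bool.false_eq_true, if_false]
      simp only [hfiS, if_neg hc]
      by_cases hbr : dist + 1 > tol
      · rw [if_pos hbr]
        cases hfi : List.findIdx? (fun c' => sl[upto]! == c') w with
        | none => rfl
        | some j =>
          have hgt : (dist + ((j:Int) + 1) > max tol 0) := by omega
          simp only [Option.map_some]
          push_cast
          simp [hgt]
      · rw [if_neg hbr]
        rw [ih upto h (dist + 1) (max greatest (dist + 1)) (by omega) (by omega) (by omega) (by omega)]
        cases hfi : List.findIdx? (fun c' => sl[upto]! == c') w with
        | none => rfl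
        | some j =>
          simp only [Option.map_some]
          by_cases hcc : dist + 1 + (j:Int) > max tol 0
          · have hgt : dist + ((j:Int)+1) > max tol 0 := by omega
            push_cast
            simp [hcc, hgt]
          · have h2' : ¬ (dist + (((j:Int))+1) > max tol 0) := by omega
            have hcc' : ¬ (dist + 1 + (j:Int) > max tol 0) := hcc
            push_cast
            simp only [hcc, if_false, h2', List.drop_succ_cons]
            have e1 : max (max greatest (dist + 1)) (dist + 1 + (j:Int)) = max greatest (dist + ((j:Int)+1)) := by
              rw [max_def, max_def, max_def]; split_ifs <;> omega
            rw [e1]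

theorem gap_eq (sl : List Char) (tol : Int) (hsl : sl ≠ []) (w : List Char) :
    lfInner sl tol w 0 0 0 = bGreatestGap w sl tol := by
  cases sl with
  | nil => exact absurd rfl hsl
  | cons p ps =>
    rw [bGreatestGap, bGapLoop_cons,
      inner_eq (p :: ps) tol w 0 (by simp) 0 0 le_rfl (le_max_right tol 0) le_rfl le_rfl]
    have hb : ∀ c', ((p :: ps)[0]! == c') = (p == c') := fun c' => rfl
    simp only [hb]
    cases hfi : List.findIdx? (fun c' => p == c') w with
    | none => rfl
    | some j =>
      have hmx : max (0:Int) ((0:Int) + (j:Int)) = (if (j:Int) > 0 then (j:Int) else 0) := by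
        rw [max_def]; split_ifs <;> omega
      simp only [zero_add, List.drop_succ_cons, List.drop_zero] at *
      rw [show max (0:Int) ((j:Int)) = (if (j:Int) > (0:Int) then (j:Int) else 0) by
        rw [max_def]; split_ifs <;> omega]

theorem dictfold_eq (f : String → Option Int) :
    ∀ (cs : List String) (d : PySem.Dict Int (List String)),
      cs.foldl (fun d c => match f c with
          | some g => d.modify g [] (fun l => l ++ [c]) | none => d) d
      = (cs.flatMap (fun c => match f c with | some g => [(g, c)] | none => [])).foldl
          (fun d pr => d.modify pr.1 [] (fun l => l ++ [pr.2])) d := by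
  intro cs
  induction cs with
  | nil => intro d; rfl
  | cons c cs ih =>
    intro d
    cases hfc : f c with
    | none => simp only [List.foldl_cons, List.flatMap_cons, hfc, List.nil_append, ih]
    | some g => simp only [List.foldl_cons, List.flatMap_cons, hfc, List.cons_append,
        List.nil_append, ih]

theorem accfold_eq (f : String → Option Int) :
    ∀ (cs : List String) (acc : List (Int × String)),
      cs.foldl (fun acc c => match f c with
          | some g => acc ++ [(g, c)] | none => acc) acc
      = acc ++ cs.flatMap (fun c => match f c with | some g => [(g, c)] | none => []) := by
  intro cs
  induction cs with
  | nil => intro acc; simp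
  | cons c cs ih =>
    intro acc
    cases hfc : f c with
    | none => simp [hfc, ih]
    | some g => simp [hfc, ih]

theorem lessFuzzyFilter_eq_alt (candidates : List String) (searchLetters : String) (tolerance : Int)
    (hpre : searchLetters ≠ "") :
    lessFuzzyFilter candidates searchLetters tolerance
      = lessFuzzyFilter_alt candidates searchLetters tolerance := by
  have hsl : searchLetters.toList ≠ [] := by
    simpa [String.toList_eq_nil_iff] using hpre
  -- the flat list of (gap, candidate) pairs, phrased with B's matcher
  have hfun : ∀ c : String,
      lfInner searchLetters.toList tolerance c.toList 0 0 0
        = bGreatestGap c.toList searchLetters.toList tolerance :=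
    fun c => gap_eq searchLetters.toList tolerance hsl c.toList
  -- A's dict as a fold over the pair list
  have hA1 := dictfold_eq (fun c => lfInner searchLetters.toList tolerance c.toList 0 0 0)
      candidates PySem.Dict.empty
  have hflat : candidates.flatMap (fun c =>
        match lfInner searchLetters.toList tolerance c.toList 0 0 0 with
        | some g => [(g, c)] | none => [])
      = candidates.flatMap (fun c =>
        match bGreatestGap c.toList searchLetters.toList tolerance with
        | some g => [(g, c)] | none => []) :=
    List.flatMap_congr (fun c _ => by rw [hfun c])
  rw [hflat] at hA1
  -- names
  set P : List (Int × String) := candidates.flatMap (fun c =>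
      match bGreatestGap c.toList searchLetters.toList tolerance with
      | some g => [(g, c)] | none => []) with hPdef
  set d : PySem.Dict Int (List String) :=
      P.foldl (fun d pr => d.modify pr.1 [] (fun l => l ++ [pr.2])) PySem.Dict.empty with hddef
  -- value/keys of d
  have hgetD : ∀ k : Int, d.getD k [] = (P.filter (fun pr => pr.1 == k)).map (fun pr => pr.2) := by
    intro k
    rw [hddef, PySem.Dict.getD_foldl_modify_append P PySem.Dict.empty k, PySem.Dict.getD_empty]
    simp
  have hkeys : d.keys = PySem.Set.ofList (P.map Prod.fst) := by
    rw [hddef]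
    have hk := PySem.Dict.keys_foldl_modify_key P Prod.fst [] (fun _ pr l => l ++ [pr.2])
        PySem.Dict.empty
    simpa [PySem.Dict.keys_empty] using hk
  -- the sorted distinct keys
  have hpw : (PySem.List.sorted (PySem.Set.ofList (P.map Prod.fst)) (fun k => k) false).Pairwise
      (· < ·) := PySem.List.sorted_ofList_pairwise_lt (P.map Prod.fst)
  have hmem : ∀ pr ∈ P, pr.1 ∈
      PySem.List.sorted (PySem.Set.ofList (P.map Prod.fst)) (fun k => k) false := by
    intro pr hpr
    rw [PySem.List.mem_sorted, PySem.Set.mem_ofList]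
    exact List.mem_map_of_mem hpr
  have hbucket := bucket_concat
      (PySem.List.sorted (PySem.Set.ofList (P.map Prod.fst)) (fun k => k) false) hpw P hmem
  -- A's result
  have hAres : lessFuzzyFilter candidates searchLetters tolerance
      = (PySem.List.sorted d.keys (fun k => k) false).foldl
          (fun results k => results ++ d.getD k []) [] := by
    rw [lessFuzzyFilter, hA1]
  rw [hAres, PySem.List.foldl_append_eq_flatMap, List.nil_append, hkeys]
  -- B's result
  have hBres : lessFuzzyFilter_alt candidates searchLetters tolerance
      = (PySem.List.sorted P (fun pair => pair.1) false).map (fun pair => pair.2) := by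
    rw [lessFuzzyFilter_alt, accfold_eq (fun c => bGreatestGap c.toList searchLetters.toList tolerance)
        candidates [], List.nil_append]
  rw [hBres, hbucket]
  refine Eq.trans (List.flatMap_congr (fun k _ => hgetD k)) ?_
  exact (List.map_flatMap (f := fun pair => pair.2)
    (g := fun g => P.filter (fun pr => pr.1 == g))
    (l := PySem.List.sorted (PySem.Set.ofList (P.map Prod.fst)) (fun k => k) false)).symm

-- ===== VERDICT (by name: the statements are the Claim_ definitions above) =====
theorem lessFuzzyFilter_raises : Claim_raises_lessFuzzyFilter := by
  unfold Claim_raises_lessFuzzyFilter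
  refine ⟨?_, by decide⟩
  intro c s t _ hr hp
  exact hp hr.1

theorem lessFuzzyFilter_spec : Claim_equal_lessFuzzyFilter := by
  have _complement := lessFuzzyFilter_raises  -- the excluded region's behaviour, proved above
  intro candidates searchLetters tolerance _ hpre
  unfold Spec_lessFuzzyFilter
  exact lessFuzzyFilter_eq_alt candidates searchLetters tolerance hpre
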